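-- pv_equiv track=rewrite | github.com/JiayangWu/LeetCode-Python | 1121.将数组分成几个递增序列/1121-将数组分成几个递增序列.py | canDivideIntoSubsequences
-- ===== SOURCE A (Python) =====
-- def canDivideIntoSubsequences(nums, K):
--     """
--     :type nums: List[int]
--     :type K: int
--     :rtype: bool
--     """
--     if len(nums) < K:
--         return False
--     from collections import Counter
--     d = Counter(nums)
--     maxx = 1
--     for key, val in d.items():
--         maxx = max(val, maxx)
--
--     return maxx * K <= len(nums)
-- ===== SOURCE B (Python) =====
-- def canDivideIntoSubsequences(nums, K):
--     if len(nums) < K: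
--         return False
--     maxx = 1
--     cur = 0
--     prev = None
--     for x in sorted(nums):
--         if x == prev:
--             cur += 1
--         else:
--             cur = 1
--             prev = x
--         if cur > maxx:
--             maxx = cur
--     return maxx * K <= len(nums)
-- ===== Notes on version B (the rewrite author's own statement) =====
-- stated objective: alternative
-- what changed: Replaces the Counter frequency table with a sort-then-run-length scan: the maximum multiplicity is read off as the longest run of equal consecutive values in sorted(nums).
import Mathlib
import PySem

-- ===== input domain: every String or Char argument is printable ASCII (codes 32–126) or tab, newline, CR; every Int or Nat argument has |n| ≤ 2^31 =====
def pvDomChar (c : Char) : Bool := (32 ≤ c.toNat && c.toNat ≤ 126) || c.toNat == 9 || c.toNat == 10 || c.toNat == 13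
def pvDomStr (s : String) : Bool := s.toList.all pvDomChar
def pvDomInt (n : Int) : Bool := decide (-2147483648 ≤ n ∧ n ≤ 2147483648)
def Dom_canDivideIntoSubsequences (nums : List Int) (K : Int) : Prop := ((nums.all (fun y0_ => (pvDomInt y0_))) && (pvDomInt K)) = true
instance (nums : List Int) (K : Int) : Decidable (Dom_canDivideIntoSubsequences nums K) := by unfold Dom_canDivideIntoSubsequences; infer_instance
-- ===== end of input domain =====

-- B replaces A's Counter frequency table by a sort-then-run-length scan over sorted(nums):
-- an alternative counting technique of similar cost. Neither version mutates its arguments.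

-- ===== PORT A =====
def canDivideIntoSubsequences (nums : List Int) (K : Int) : Bool :=
  if (nums.length : Int) < K then false
  else
    let d := PySem.Dict.counter nums
    let maxx := d.items.foldl (fun maxx kv => max kv.2 maxx) 1
    decide (maxx * K ≤ (nums.length : Int))

-- ===== PORT B =====
-- one step of Source B's loop body; state = (prev, cur, maxx)
def pvStep (acc : Option Int × Int × Int) (x : Int) : Option Int × Int × Int :=
  let (prev, cur) := if some x = acc.1 then (acc.1, acc.2.1 + 1) else (some x, (1 : Int))
  (prev, cur, if cur > acc.2.2 then cur else acc.2.2)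

def canDivideIntoSubsequences_alt (nums : List Int) (K : Int) : Bool :=
  if (nums.length : Int) < K then false
  else
    let st := (PySem.List.sorted nums (fun x => x) false).foldl pvStep (none, 0, 1)
    decide (st.2.2 * K ≤ (nums.length : Int))

-- ===== PRECONDITION & SPEC =====
def Spec_canDivideIntoSubsequences (nums : List Int) (K : Int) (out : Bool) : Prop := out = canDivideIntoSubsequences_alt nums K
instance (nums : List Int) (K : Int) (out : Bool) : Decidable (Spec_canDivideIntoSubsequences nums K out) := by unfold Spec_canDivideIntoSubsequences; infer_instance

-- ===== CLAIM (what is proved, stated in full; the proofs are below) =====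
def Claim_equal_canDivideIntoSubsequences : Prop := ∀ (nums : List Int) (K : Int), Dom_canDivideIntoSubsequences nums K → Spec_canDivideIntoSubsequences nums K (canDivideIntoSubsequences nums K)

-- ===== LEMMAS AND PROOFS =====

-- maximum multiplicity of a list
def pvMC (l : List Int) : Nat := l.toFinset.sup (fun y => l.count y)

lemma pvMC_nil : pvMC [] = 0 := by simp [pvMC]

-- peel the first element's run: the decomposition B's scan follows
lemma pvMC_cons (x : Int) (xs : List Int) :
    pvMC (x :: xs) = max (1 + xs.count x) (pvMC (xs.filter (· ≠ x))) := by
  unfold pvMC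
  apply le_antisymm
  · apply Finset.sup_le
    intro y hy
    simp only [List.mem_toFinset, List.mem_cons] at hy
    by_cases hyx : y = x
    · subst hyx
      rw [List.count_cons_self]
      exact le_max_of_le_left (by omega)
    · have hmem : y ∈ xs := by
        rcases hy with h | h
        · exact absurd h hyx
        · exact h
      have hcy : (x :: xs).count y = (xs.filter (· ≠ x)).count y := by
        rw [List.count_filter (by simpa using hyx)]
        simp [List.count_cons]
        exact fun h => hyx h.symm
      rw [hcy]
      refine le_max_of_le_right
        (Finset.le_sup (f := fun z => (xs.filter (· ≠ x)).count z) ?_)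
      simp [hmem, hyx]
  · apply max_le
    · have hx1 : 1 + xs.count x = (x :: xs).count x := by
        rw [List.count_cons_self]; omega
      rw [hx1]
      exact Finset.le_sup (f := fun z => (x :: xs).count z) (by simp)
    · apply Finset.sup_le
      intro y hy
      simp only [List.mem_toFinset, List.mem_filter, decide_eq_true_eq] at hy
      obtain ⟨hyx, hne⟩ := hy
      have hc1 : (xs.filter (· ≠ x)).count y = (x :: xs).count y := by
        rw [List.count_filter (by simpa using hne)]
        simp [List.count_cons]
        exact fun h => hne h.symm
      rw [hc1]
      exact Finset.le_sup (f := fun z => (x :: xs).count z) (by simp [hyx])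

-- A's item loop is max of 1 and the sup of the counted values
lemma pvFoldMax (ks : List Int) (f : Int → Nat) (a : Int) (ha : 0 ≤ a) :
    ks.foldl (fun m k => max ((f k : Int)) m) a = max a ((ks.toFinset.sup f : Nat) : Int) := by
  induction ks generalizing a with
  | nil => simp; omega
  | cons x xs ih =>
    rw [List.foldl_cons, ih _ (by positivity), List.toFinset_cons, Finset.sup_insert]
    have : ((f x ⊔ xs.toFinset.sup f : Nat) : Int) = max (f x : Int) ((xs.toFinset.sup f : Nat) : Int) := by
      push_cast; rfl
    rw [this]
    omega

-- B's scan from a live run (prev = p, current run length c, best m) computes the running max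
lemma pvScan (l : List Int) (p c m : Int) (hs : l.Pairwise (· ≤ ·)) (hp : ∀ x ∈ l, p ≤ x)
    (hc : 1 ≤ c) (hcm : c ≤ m) (hm : 1 ≤ m) :
    (l.foldl pvStep (some p, c, m)).2.2
      = max m (max (c + (l.count p : Int)) ((pvMC (l.filter (· ≠ p)) : Nat) : Int)) := by
  induction l generalizing p c m with
  | nil => simp [pvMC_nil]; omega
  | cons x xs ih =>
    rw [List.pairwise_cons] at hs
    obtain ⟨hx, hxs⟩ := hs
    rw [List.foldl_cons]
    by_cases hxp : x = p
    · subst hxp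
      have hstep : pvStep (some x, c, m) x = (some x, c + 1, if c + 1 > m then c + 1 else m) := by
        simp [pvStep]
      rw [hstep, ih x (c + 1) _ hxs hx (by omega) (by split <;> omega) (by split <;> omega)]
      have h1 : (x :: xs).count x = xs.count x + 1 := List.count_cons_self
      have h2 : (x :: xs).filter (· ≠ x) = xs.filter (· ≠ x) := by simp
      rw [h1, h2]
      have h0 : (0 : Int) ≤ ((xs.count x : Nat) : Int) := by positivity
      push_cast
      split <;> omega
    · have hnot : ¬ (1 > m) := by omega
      have hstep : pvStep (some p, c, m) x = (some x, 1, m) := by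
        simp [pvStep, hxp, hnot]
      have hplt : p < x := lt_of_le_of_ne (hp x (by simp)) (fun h => hxp h.symm)
      rw [hstep, ih x 1 m hxs hx (by omega) hm hm]
      have hnp : ∀ y ∈ x :: xs, y ≠ p := by
        intro y hy
        rcases List.mem_cons.mp hy with h | h
        · subst h; exact hxp
        · exact fun he => absurd (hx y h) (by subst he; omega)
      have h1 : (x :: xs).count p = 0 := by
        rw [List.count_eq_zero]
        exact fun hmem => (hnp p hmem) rfl
      have h2 : (x :: xs).filter (· ≠ p) = x :: xs := by
        apply List.filter_eq_self.mpr
        intro y hy; simpa using hnp y hy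
      rw [h1, h2, pvMC_cons]
      push_cast
      omega

-- ===== VERDICT (by name: the statement is the Claim_ definition above) =====
theorem canDivideIntoSubsequences_spec : Claim_equal_canDivideIntoSubsequences := by
  intro nums K _
  unfold Spec_canDivideIntoSubsequences canDivideIntoSubsequences canDivideIntoSubsequences_alt
  split
  · rfl
  · simp only [PySem.Dict.items_counter, List.foldl_map]
    rw [pvFoldMax (PySem.Set.ofList nums) (fun k => nums.count k) 1 (by omega)]
    obtain ⟨s, hs⟩ : ∃ s, s = PySem.List.sorted nums (fun x => x) false := ⟨_, rfl⟩
    rw [← hs]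
    have hperm : s.Perm nums := hs ▸ PySem.List.sorted_perm nums (fun x => x) false
    have hsup : (PySem.Set.ofList nums).toFinset.sup (fun k => nums.count k) = pvMC s := by
      unfold pvMC
      have hkeys : (PySem.Set.ofList nums).toFinset = s.toFinset := by
        apply Finset.ext
        intro y
        simp [List.mem_toFinset, PySem.Set.mem_ofList, hperm.mem_iff]
      rw [hkeys]
      exact Finset.sup_congr rfl (fun y _ => (hperm.count_eq y).symm)
    rw [hsup]
    have hpw0 : s.Pairwise (· ≤ ·) := by
      have := PySem.List.sorted_pairwise nums (fun x => x)
      rw [← hs] at this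
      simpa using this
    clear hs hperm hsup
    cases s with
    | nil => simp [pvMC_nil]
    | cons x t =>
      rw [List.pairwise_cons] at hpw0
      have hstep : pvStep (none, 0, 1) x = (some x, 1, 1) := by simp [pvStep]
      rw [List.foldl_cons, hstep,
        pvScan t x 1 1 hpw0.2 hpw0.1 (by omega) (by omega) (by omega)]
      rw [pvMC_cons]
      push_cast
      rfl
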